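-- pv_equiv track=rewrite | github.com/OranDuanStudy/LRCM | pymo/parsers.py | _read_channels
-- ===== SOURCE A (Python) =====
-- def _read_channels(bvh, token_index):
--     '''
--     Read and parse channel information
--
--     Args:
--     bvh - Parsed token list
--     token_index - Current token index being read
--
--     Returns:
--     Channel list, next token index to read, and channel order information
--     '''
--     if bvh[token_index] != ('IDENT', 'CHANNELS'):
--         return None, None, None
--     token_index = token_index + 1
--     channel_count = int(bvh[token_index][1])
--     token_index = token_index + 1
--     channels = [""] * channel_count
--     order = ""
--     for i in range(channel_count):
--         channels[i] = bvh[token_index][1]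
--         token_index = token_index + 1
--         if(channels[i] == "Xrotation" or channels[i]== "Yrotation" or channels[i]== "Zrotation"):
--             order += channels[i][0]
--         else :
--             order = ""
--     return channels, token_index, order
-- ===== SOURCE B (Python) =====
-- def _read_channels(bvh, token_index):
--     if bvh[token_index] != ('IDENT', 'CHANNELS'):
--         return None, None, None
--     channel_count = int(bvh[token_index + 1][1])
--     channels = [bvh[token_index + 2 + i][1] for i in range(channel_count)]
--     k = len(channels)
--     while k > 0 and channels[k - 1] in ("Xrotation", "Yrotation", "Zrotation"):
--         k -= 1
--     order = "".join(c[0] for c in channels[k:])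
--     return channels, token_index + 2 + len(channels), order
-- ===== Notes on version B (the rewrite author's own statement) =====
-- stated objective: simpler
-- what changed: B builds the channels list with a single indexed comprehension and then computes the rotation order in a separate backward scan for the trailing run of rotation channels, instead of A's preallocated list mutated in a loop that also steps token_index and accumulates-and-resets the order string.
import Mathlib
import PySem

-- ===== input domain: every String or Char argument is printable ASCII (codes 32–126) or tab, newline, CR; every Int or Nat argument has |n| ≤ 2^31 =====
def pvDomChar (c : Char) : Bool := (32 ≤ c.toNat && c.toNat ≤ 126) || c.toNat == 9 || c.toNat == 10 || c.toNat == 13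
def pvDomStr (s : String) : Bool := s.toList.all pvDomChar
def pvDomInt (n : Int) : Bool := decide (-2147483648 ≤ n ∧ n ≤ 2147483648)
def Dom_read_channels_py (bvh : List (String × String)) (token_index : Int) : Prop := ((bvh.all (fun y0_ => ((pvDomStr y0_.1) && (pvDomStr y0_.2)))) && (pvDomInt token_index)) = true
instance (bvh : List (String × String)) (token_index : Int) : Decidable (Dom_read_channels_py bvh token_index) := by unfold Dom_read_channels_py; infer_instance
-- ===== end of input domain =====

-- B replaces A's preallocate-and-assign loop (which interleaves channel reading, index stepping
-- and an accumulate-and-reset order string) by a slice-style comprehension for the channels plus a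
-- separate backward scan for the trailing rotation run; objective: simpler.


-- ===== PORT A =====
-- Python string concatenation on `order` is ported on List Char (PySem convention); the final
-- return wraps it with String.mk.  `channels[i][0]` is ported as `.toList.headD ' '`: in that
-- branch the string is one of the nonempty literals "Xrotation"/"Yrotation"/"Zrotation", so it is exact.
-- Loop body of A: state (channels, token_index, order); `none` = IndexError (excluded by Pre_).
def rotStepA (bvh : List (String × String)) (st : Option (List String × Int × List Char)) (i : Int) :
    Option (List String × Int × List Char) :=
  match st with
  | none => none
  | some (channels, ti, order) =>
    match PySem.List.pyGet? bvh ti with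
    | none => none                       -- bvh[token_index] raises IndexError
    | some tok =>
      let v := tok.2                     -- channels[i] = bvh[token_index][1]
      let channels' := channels.set i.toNat v
      if v = "Xrotation" ∨ v = "Yrotation" ∨ v = "Zrotation" then
        some (channels', ti + 1, order ++ [v.toList.headD ' '])   -- order += channels[i][0]
      else
        some (channels', ti + 1, [])                              -- order = ""

def read_channels_py (bvh : List (String × String)) (token_index : Int) :
    Option (List String) × Option Int × Option String :=
  match PySem.List.pyGet? bvh token_index with
  | none => (none, none, none)           -- IndexError (excluded by Pre_)
  | some tok =>
    if tok ≠ ("IDENT", "CHANNELS") then (none, none, none)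
    else
      match PySem.List.pyGet? bvh (token_index + 1) with
      | none => (none, none, none)       -- IndexError (excluded by Pre_)
      | some tok2 =>
        match PySem.Int.ofStr? tok2.2 with
        | none => (none, none, none)     -- ValueError from int() (excluded by Pre_)
        | some c =>
          match (PySem.List.pyRange 0 c 1).foldl (rotStepA bvh)
              (some (List.replicate c.toNat "", token_index + 2, ([] : List Char))) with
          | none => (none, none, none)   -- IndexError inside the loop (excluded by Pre_)
          | some (channels, ti, order) => (some channels, some ti, some (String.mk order))

-- ===== PORT B =====
def isRotB (s : String) : Bool := s == "Xrotation" || s == "Yrotation" || s == "Zrotation"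

-- Source B's `while k > 0 and channels[k-1] in (...)` walks from the end; ported as a recursion over
-- the reversed list counting the trailing rotation run (k = length - this count).
def trailingRotB : List String → Nat
  | [] => 0
  | s :: rest => if isRotB s then trailingRotB rest + 1 else 0

def read_channels_py_alt (bvh : List (String × String)) (token_index : Int) :
    Option (List String) × Option Int × Option String :=
  match PySem.List.pyGet? bvh token_index with
  | none => (none, none, none)           -- IndexError (excluded by Pre_)
  | some tok =>
    if tok = ("IDENT", "CHANNELS") then
      match PySem.List.pyGet? bvh (token_index + 1) with
      | none => (none, none, none)       -- IndexError (excluded by Pre_)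
      | some tok2 =>
        match PySem.Int.ofStr? tok2.2 with
        | none => (none, none, none)     -- ValueError from int() (excluded by Pre_)
        | some c =>
          -- channels = [bvh[token_index+2+i][1] for i in range(channel_count)]
          match (PySem.List.pyRange 0 c 1).mapM
              (fun i => (PySem.List.pyGet? bvh (token_index + 2 + i)).map Prod.snd) with
          | none => (none, none, none)   -- IndexError in the comprehension (excluded by Pre_)
          | some channels =>
            let k := channels.length - trailingRotB channels.reverse
            -- c[0] ported as `.toList.headD ' '`: every element of channels[k:] is a rotation literal, nonempty
            let order := String.mk ((channels.drop k).map (fun s => s.toList.headD ' '))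
            (some channels, some (token_index + 2 + (channels.length : Int)), some order)
    else (none, none, none)

-- ===== PRECONDITION & SPEC =====
-- Pre_ excludes exactly the inputs where the Python raises (B raises there too): token_index out of
-- range (IndexError), a count token int() cannot parse (ValueError), or a channel index past the list.
def preCheck_read_channels (bvh : List (String × String)) (token_index : Int) : Bool :=
  match PySem.List.pyGet? bvh token_index with
  | none => false
  | some tok =>
    if tok = ("IDENT", "CHANNELS") then
      match PySem.List.pyGet? bvh (token_index + 1) with
      | none => false
      | some tok2 =>
        match PySem.Int.ofStr? tok2.2 with
        | none => false
        | some c => (PySem.List.pyRange 0 c 1).all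
            (fun i => (PySem.List.pyGet? bvh (token_index + 2 + i)).isSome)
    else true

def Pre_read_channels_py (bvh : List (String × String)) (token_index : Int) : Prop :=
  preCheck_read_channels bvh token_index = true
instance (bvh : List (String × String)) (token_index : Int) : Decidable (Pre_read_channels_py bvh token_index) := by unfold Pre_read_channels_py; infer_instance

def pvWitness_read_channels_py : (List (String × String)) × Int :=
  ([("IDENT", "CHANNELS"), ("NUM", "3"), ("ID", "Xposition"), ("ID", "Yrotation"), ("ID", "Zrotation")], 0)

def Spec_read_channels_py (bvh : List (String × String)) (token_index : Int) (out : Option (List String) × Option Int × Option String) : Prop := out = read_channels_py_alt bvh token_index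
instance (bvh : List (String × String)) (token_index : Int) (out : Option (List String) × Option Int × Option String) : Decidable (Spec_read_channels_py bvh token_index out) := by unfold Spec_read_channels_py; infer_instance

-- ===== CLAIM (what is proved, stated in full; the proofs are below) =====
def Claim_equal_read_channels_py : Prop := ∀ (bvh : List (String × String)) (token_index : Int), Dom_read_channels_py bvh token_index → Pre_read_channels_py bvh token_index → Spec_read_channels_py bvh token_index (read_channels_py bvh token_index)

-- ===== LEMMAS AND PROOFS =====


-- first character of a channel name (port of s[0] on the nonempty rotation literals)
def hd0 (s : String) : Char := s.toList.headD ' '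

-- the order accumulator of A's loop, isolated on the list of channel values
def stepOrd (o : List Char) (v : String) : List Char :=
  if v = "Xrotation" ∨ v = "Yrotation" ∨ v = "Zrotation" then o ++ [hd0 v] else []

def ordF (l : List String) : List Char := l.foldl stepOrd []

lemma ordF_append_singleton (l : List String) (v : String) :
    ordF (l ++ [v]) = stepOrd (ordF l) v := by
  simp [ordF, List.foldl_append]

lemma isRotB_iff (v : String) :
    isRotB v = true ↔ (v = "Xrotation" ∨ v = "Yrotation" ∨ v = "Zrotation") := by
  simp [isRotB, or_assoc]

lemma trailingRotB_le (l : List String) : trailingRotB l ≤ l.length := by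
  induction l with
  | nil => simp [trailingRotB]
  | cons s rest ih =>
    by_cases h : isRotB s
    · simp [trailingRotB, h]; omega
    · simp [trailingRotB, h]

lemma ordF_eq_drop (l : List String) :
    ordF l = (l.drop (l.length - trailingRotB l.reverse)).map hd0 := by
  induction l using List.reverseRecOn with
  | nil => simp [ordF]
  | append_singleton l v ih =>
    rw [ordF_append_singleton]
    have htr : trailingRotB (l ++ [v]).reverse
        = if isRotB v then trailingRotB l.reverse + 1 else 0 := by
      simp [trailingRotB]
    by_cases hrot : v = "Xrotation" ∨ v = "Yrotation" ∨ v = "Zrotation"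
    · have hb : isRotB v = true := (isRotB_iff v).mpr hrot
      have hle : trailingRotB l.reverse ≤ l.length := by
        simpa using trailingRotB_le l.reverse
      rw [htr, if_pos hb]
      have hlen2 : (l ++ [v]).length - (trailingRotB l.reverse + 1)
          = l.length - trailingRotB l.reverse := by simp
      rw [hlen2, List.drop_append_of_le_length (by omega)]
      simp [stepOrd, hrot, ih]
    · have hb : isRotB v = false := by
        rcases h : isRotB v with _ | _
        · rfl
        · exact absurd ((isRotB_iff v).mp h) hrot
      rw [htr]; simp [hb, stepOrd, hrot]

lemma mapM_of_isSome (l : List Int) (f : Int → Option String)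
    (h : ∀ x ∈ l, (f x).isSome) :
    l.mapM f = some (l.map (fun x => (f x).getD "")) := by
  induction l with
  | nil => simp
  | cons x xs ih =>
    obtain ⟨b, hb⟩ := Option.isSome_iff_exists.mp (h x (by simp))
    have := ih (fun y hy => h y (by simp [hy]))
    simp [List.mapM_cons, hb, this]

lemma loopA_inv (bvh : List (String × String)) (t : Int) (n : Nat) (vals : List String)
    (hlen : vals.length = n)
    (hv : ∀ j : Nat, j < n →
      (PySem.List.pyGet? bvh (t + 2 + (j : Int))).map Prod.snd = some (vals.getD j ""))
    (m : Nat) (hm : m ≤ n) :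
    (PySem.List.pyRange 0 (m : Int) 1).foldl (rotStepA bvh)
        (some (List.replicate n "", t + 2, ([] : List Char)))
      = some (vals.take m ++ List.replicate (n - m) "", t + 2 + (m : Int), ordF (vals.take m)) := by
  induction m with
  | zero => simp [PySem.List.pyRange_one_eq_nil (by omega : (0:Int) ≤ 0), ordF]
  | succ m ihm =>
    have hmn : m < n := by omega
    have hrange : PySem.List.pyRange 0 ((m + 1 : Nat) : Int) 1
        = PySem.List.pyRange 0 ((m : Nat) : Int) 1 ++ [((m : Nat) : Int)] := by
      push_cast
      exact PySem.List.pyRange_one_succ_right (by positivity)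
    rw [hrange, List.foldl_append, ihm (by omega)]
    obtain ⟨tok, htok, hsnd⟩ := Option.map_eq_some_iff.mp (hv m hmn)
    have hset : (vals.take m ++ List.replicate (n - m) "").set m (vals.getD m "")
        = vals.take (m + 1) ++ List.replicate (n - (m + 1)) "" := by
      have hlt : m < vals.length := by omega
      have h1 : (vals.take m).length = m := by simp; omega
      have h2 : n - m = (n - (m + 1)) + 1 := by omega
      have htk : vals.take (m + 1) = vals.take m ++ [vals[m]] := by
        rw [List.take_add_one, List.getElem?_eq_getElem hlt]; rfl
      rw [List.set_append, h1]
      simp only [lt_irrefl, Nat.sub_self, h2, List.replicate_succ, List.set_cons_zero]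
      rw [List.getD_eq_getElem?_getD, List.getElem?_eq_getElem hlt, htk, List.append_assoc]
      rfl
    have htake : vals.take (m + 1) = vals.take m ++ [vals.getD m ""] := by
      have hlt : m < vals.length := by omega
      rw [List.take_add_one, List.getElem?_eq_getElem hlt, List.getD_eq_getElem vals "" hlt]
      rfl
    simp only [List.foldl_cons, List.foldl_nil, rotStepA, htok, Int.toNat_natCast, hsnd, hset]
    rw [htake, ordF_append_singleton]
    simp only [stepOrd, hd0]
    have harith : t + 2 + ((m : Nat) : Int) + 1 = t + 2 + (((m + 1 : Nat)) : Int) := by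
      push_cast; ring
    rw [harith]
    split <;> rfl

-- ===== VERDICT (by name: the statement is the Claim_ definition above) =====
theorem read_channels_py_spec : Claim_equal_read_channels_py := by
  intro bvh t hdom hpre
  unfold Spec_read_channels_py read_channels_py read_channels_py_alt
  unfold Pre_read_channels_py preCheck_read_channels at hpre
  cases hA : PySem.List.pyGet? bvh t with
  | none => simp [hA] at hpre
  | some tok =>
    simp only [hA] at hpre
    by_cases htok : tok = ("IDENT", "CHANNELS")
    · rw [if_pos htok] at hpre
      simp only [htok, ne_eq, not_true_eq_false, if_false, if_true]
      cases hB : PySem.List.pyGet? bvh (t + 1) with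
      | none => simp [hB] at hpre
      | some tok2 =>
        simp only [hB] at hpre
        cases hC : PySem.Int.ofStr? tok2.2 with
        | none => simp [hC] at hpre
        | some c =>
          simp only [hC] at hpre
          by_cases hc : 0 ≤ c
          · have hcn : c = ((c.toNat : Nat) : Int) := (Int.toNat_of_nonneg hc).symm
            have hall := List.all_eq_true.mp hpre
            have hfs : ∀ x ∈ PySem.List.pyRange 0 c 1,
                ((fun i => (PySem.List.pyGet? bvh (t + 2 + i)).map Prod.snd) x).isSome := by
              intro x hx; simpa using hall x hx
            have hmapM := mapM_of_isSome _ _ hfs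
            set vals := (PySem.List.pyRange 0 c 1).map
              (fun x => ((PySem.List.pyGet? bvh (t + 2 + x)).map Prod.snd).getD "") with hvals
            have hlen : vals.length = c.toNat := by
              simp [hvals, PySem.List.length_pyRange_one]
            have hv : ∀ j : Nat, j < c.toNat →
                (PySem.List.pyGet? bvh (t + 2 + (j : Int))).map Prod.snd
                  = some (vals.getD j "") := by
              intro j hj
              have hmem : ((j : Nat) : Int) ∈ PySem.List.pyRange 0 c 1 := by
                rw [PySem.List.mem_pyRange_one]
                constructor
                · positivity
                · omega
              have hs := hfs _ hmem
              simp only at hs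
              obtain ⟨b, hb⟩ := Option.isSome_iff_exists.mp hs
              have hget : vals[j]? = some b := by
                rw [hvals, hcn]
                have := PySem.List.getElem?_map_pyRange_zero
                  (fun x => ((PySem.List.pyGet? bvh (t + 2 + x)).map Prod.snd).getD "")
                  c.toNat j hj
                rw [this]
                simp [hb]
              rw [hb, List.getD_eq_getElem?_getD, hget]
              simp
            simp only [hC]
            have hloop := loopA_inv bvh t c.toNat vals hlen hv c.toNat le_rfl
            rw [hcn] at hloop hmapM ⊢
            simp only [Int.toNat_natCast] at hloop ⊢
            rw [hloop, hmapM]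
            have hvv : vals.take c.toNat = vals := List.take_of_length_le (by omega)
            simp only [Nat.sub_self, List.replicate_zero, List.append_nil, hvv]
            rw [hlen, ordF_eq_drop]
            simp [hlen]
            have hfun : hd0 = fun s : String => s.toList.head?.getD ' ' := by
              funext s
              simp [hd0, List.headD_eq_head?_getD]
            rw [hfun]
          · have hnil : PySem.List.pyRange 0 c 1 = [] :=
              PySem.List.pyRange_one_eq_nil (by omega)
            have hc0 : c.toNat = 0 := by omega
            simp [hC, hnil, hc0, trailingRotB]
    · rw [if_neg htok] at hpre
      simp [htok]
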